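-- pv_equiv track=rewrite | github.com/altinus01/modern-mill-monte-carlo | code/cards.py | parse_cmc_int
-- ===== SOURCE A (Python) =====
-- def parse_cmc_int(cost_str:str|None)->int:
--     """Parses a mana cost.
--
--     Parameters:
--         cost_str: string|None, Ex: '1UB'
--
--     Returns:
--         total: int
--         """
--     if cost_str == 0:
--         return 0
--     if cost_str == None:
--         return 0
--     total = 0
--     digits = ''
--     for c in cost_str:
--         if c.isdigit():
--             digits += c
--         else:
--             if digits:
--                 total += int(digits)
--                 digits = ''
--             total += 1  # Each symbol like U, B, G adds 1
--     if digits: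
--         total += int(digits)
--     return total
-- ===== SOURCE B (Python) =====
-- def parse_cmc_int(cost_str):
--     """Parses a mana cost by splitting it into maximal digit / non-digit runs:
--     each digit run adds its integer value, each non-digit run adds its length."""
--     if cost_str == 0:
--         return 0
--     if cost_str is None:
--         return 0
--     runs = []
--     for c in cost_str:
--         if runs and runs[-1][0] == c.isdigit():
--             runs[-1][1].append(c)
--         else:
--             runs.append([c.isdigit(), [c]])
--     total = 0
--     for is_digit, run in runs:
--         total += int(''.join(run)) if is_digit else len(run)
--     return total
-- ===== Notes on version B (the rewrite author's own statement) =====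
-- stated objective: alternative
-- what changed: B splits the string into maximal digit/non-digit runs first and then sums int(run) for digit runs and len(run) for the rest, instead of A's single pass that flushes a digit accumulator char-by-char and counts symbols one at a time.
import Mathlib
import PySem

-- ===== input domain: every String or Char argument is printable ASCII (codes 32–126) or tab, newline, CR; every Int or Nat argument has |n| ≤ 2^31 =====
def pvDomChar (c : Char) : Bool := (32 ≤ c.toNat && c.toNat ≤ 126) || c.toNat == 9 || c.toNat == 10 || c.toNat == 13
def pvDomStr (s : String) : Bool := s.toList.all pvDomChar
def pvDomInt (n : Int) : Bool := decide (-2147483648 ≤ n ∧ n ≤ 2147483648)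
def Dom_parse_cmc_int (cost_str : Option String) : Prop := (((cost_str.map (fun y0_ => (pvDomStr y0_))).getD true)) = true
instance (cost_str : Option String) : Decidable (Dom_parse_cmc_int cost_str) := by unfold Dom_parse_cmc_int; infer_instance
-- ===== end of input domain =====

-- B splits the mana-cost string into maximal digit/non-digit runs and sums int(run) / len(run),
-- instead of A's char-by-char pass with a flushed digit accumulator; equal on the whole domain.


-- ===== PORT A =====
-- A's loop body: on a digit, extend the buffer; otherwise flush the buffer (total += int(digits))
-- and count the symbol.  int(digits) is ported as (PySem.Int.ofChars? _).getD 0; the buffer is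
-- always a nonempty run of ASCII digits at the call, so ofChars? is never none there.
def pvAStep (st : Int × List Char) (c : Char) : Int × List Char :=
  if PySem.Chars.isdigit c then (st.1, st.2 ++ [c])
  else
    let st' := if st.2 = [] then st else (st.1 + (PySem.Int.ofChars? st.2).getD 0, ([] : List Char))
    (st'.1 + 1, st'.2)

-- 'cost_str == 0' is always False for a str or None value, so that guard is a no-op on this type.
def parse_cmc_int (cost_str : Option String) : Int :=
  match cost_str with
  | none => 0
  | some s =>
    let st := s.toList.foldl pvAStep (0, [])
    if st.2 = [] then st.1 else st.1 + (PySem.Int.ofChars? st.2).getD 0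

-- ===== PORT B =====
-- B's first loop: extend the last run if its digit-flag matches, else open a new run
-- (runs[-1][1] += c  ↦  dropLast ++ [updated last]).
def pvAddRun (runs : List (Bool × List Char)) (c : Char) : List (Bool × List Char) :=
  match runs.getLast? with
  | some p =>
    if p.1 == PySem.Chars.isdigit c then runs.dropLast ++ [(p.1, p.2 ++ [c])]
    else runs ++ [(PySem.Chars.isdigit c, [c])]
  | none => runs ++ [(PySem.Chars.isdigit c, [c])]

-- B's second loop: total += int(run) if is_digit else len(run).  A digit run is nonempty ASCII
-- digits, so ofChars? is never none there.
def pvContrib (t : Int) (p : Bool × List Char) : Int :=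
  t + (if p.1 then (PySem.Int.ofChars? p.2).getD 0 else (p.2.length : Int))

def parse_cmc_int_alt (cost_str : Option String) : Int :=
  match cost_str with
  | none => 0
  | some s =>
    let runs := s.toList.foldl pvAddRun []
    runs.foldl pvContrib 0

-- ===== PRECONDITION & SPEC =====
def Spec_parse_cmc_int (cost_str : Option String) (out : Int) : Prop := out = parse_cmc_int_alt cost_str
instance (cost_str : Option String) (out : Int) : Decidable (Spec_parse_cmc_int cost_str out) := by unfold Spec_parse_cmc_int; infer_instance

-- ===== CLAIM (what is proved, stated in full; the proofs are below) =====
def Claim_equal_parse_cmc_int : Prop := ∀ (cost_str : Option String), Dom_parse_cmc_int cost_str → Spec_parse_cmc_int cost_str (parse_cmc_int cost_str)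

-- ===== LEMMAS AND PROOFS =====

-- the contribution of a single run
def pvRunVal (p : Bool × List Char) : Int :=
  if p.1 then (PySem.Int.ofChars? p.2).getD 0 else (p.2.length : Int)

-- the value of a run list
def pvVal (runs : List (Bool × List Char)) : Int := (runs.map pvRunVal).sum

lemma pvContrib_eq_add (t : Int) (runs : List (Bool × List Char)) :
    runs.foldl pvContrib t = t + pvVal runs := by
  simpa [pvContrib, pvRunVal, pvVal] using PySem.List.foldl_add runs pvRunVal t

lemma pvVal_concat (runs : List (Bool × List Char)) (p : Bool × List Char) :
    pvVal (runs ++ [p]) = pvVal runs + pvRunVal p := by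
  simp [pvVal]

-- the simulation invariant between A's state (t, ds) and B's run list
def pvInv (t : Int) (ds : List Char) (runs : List (Bool × List Char)) : Prop :=
  if ds = [] then
    pvVal runs = t ∧ (∀ p, runs.getLast? = some p → p.1 = false)
  else
    ∃ rs, runs = rs ++ [(true, ds)] ∧ pvVal rs = t

-- A's finishing step applied to a state
def pvAFin (st : Int × List Char) : Int :=
  if st.2 = [] then st.1 else st.1 + (PySem.Int.ofChars? st.2).getD 0

lemma pvSim : ∀ (l : List Char) (t : Int) (ds : List Char) (runs : List (Bool × List Char)),
    pvInv t ds runs →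
    pvAFin (l.foldl pvAStep (t, ds)) = (l.foldl pvAddRun runs).foldl pvContrib 0 := by
  intro l
  induction l with
  | nil =>
    intro t ds runs hinv
    simp only [List.foldl_nil, pvContrib_eq_add, zero_add]
    by_cases hds : ds = []
    · simp only [pvInv, hds] at hinv
      simp [pvAFin, hds, hinv.1.symm]
    · simp only [pvInv, if_neg hds] at hinv
      obtain ⟨rs, hruns, hval⟩ := hinv
      rw [hruns, pvVal_concat]
      simp [pvAFin, hds, hval, pvRunVal]
  | cons c l ih =>
    intro t ds runs hinv
    simp only [List.foldl_cons]
    by_cases hc : PySem.Chars.isdigit c = true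
    · -- digit character
      by_cases hds : ds = []
      · -- open a new digit run
        simp only [pvInv, hds] at hinv
        obtain ⟨hval, hlast⟩ := hinv
        have hstep : pvAddRun runs c = runs ++ [(true, [c])] := by
          unfold pvAddRun
          cases hruns : runs.getLast? with
          | none => simp [hc]
          | some p =>
            have : p.1 = false := hlast p hruns
            simp [this, hc]
        rw [hstep]
        have hA : pvAStep (t, ds) c = (t, [c]) := by simp [pvAStep, hc, hds]
        rw [hA]
        exact ih t [c] _ (by simp [pvInv, hval])
      · -- extend the trailing digit run
        simp only [pvInv, if_neg hds] at hinv
        obtain ⟨rs, hruns, hval⟩ := hinv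
        have hstep : pvAddRun runs c = rs ++ [(true, ds ++ [c])] := by
          unfold pvAddRun
          simp [hruns, hc]
        rw [hstep]
        have hA : pvAStep (t, ds) c = (t, ds ++ [c]) := by simp [pvAStep, hc]
        rw [hA]
        exact ih t (ds ++ [c]) _ (by simp [pvInv, hval])
    · -- non-digit character
      by_cases hds : ds = []
      · simp only [pvInv, hds] at hinv
        obtain ⟨hval, hlast⟩ := hinv
        have hA : pvAStep (t, ds) c = (t + 1, []) := by simp [pvAStep, hc, hds]
        rw [hA]
        cases hruns : runs.getLast? with
        | none =>
          -- runs is empty: open a fresh non-digit run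
          have hnil : runs = [] := List.getLast?_eq_none_iff.mp hruns
          have hstep : pvAddRun runs c = [(false, [c])] := by
            unfold pvAddRun; simp [hnil, hc]
          rw [hstep]
          have ht : t = 0 := by simpa [hnil, pvVal] using hval.symm
          exact ih (t + 1) [] _ (by simp [pvInv, pvVal, pvRunVal, ht])
        | some p =>
          -- extend the trailing non-digit run
          have hpf : p.1 = false := hlast p hruns
          obtain ⟨rs, hrs⟩ := List.getLast?_eq_some_iff.mp hruns
          have hstep : pvAddRun runs c = rs ++ [(false, p.2 ++ [c])] := by
            unfold pvAddRun
            simp [hpf, hc, hrs]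
          rw [hstep]
          have hval' : pvVal rs + (p.2.length : Int) = t := by
            have := hval
            rw [hrs, pvVal_concat] at this
            simpa [pvRunVal, hpf] using this
          refine ih (t + 1) [] _ ?_
          simp only [pvInv]
          constructor
          · rw [pvVal_concat]
            have hcontrib : pvRunVal (false, p.2 ++ [c]) = (p.2.length : Int) + 1 := by
              simp [pvRunVal]
            rw [hcontrib, ← hval']
            ring
          · intro q hq
            simp at hq
            simp [← hq]
      · -- flush the digit run, then count the symbol
        simp only [pvInv, if_neg hds] at hinv
        obtain ⟨rs, hruns, hval⟩ := hinv
        have hA : pvAStep (t, ds) c = (t + (PySem.Int.ofChars? ds).getD 0 + 1, []) := by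
          simp [pvAStep, hc, hds]
        rw [hA]
        have hstep : pvAddRun runs c = (rs ++ [(true, ds)]) ++ [(false, [c])] := by
          unfold pvAddRun
          simp [hruns, hc]
        rw [hstep]
        refine ih _ [] _ ?_
        simp only [pvInv]
        refine ⟨?_, ?_⟩
        · rw [pvVal_concat, pvVal_concat]
          simp [pvRunVal, hval]
        · intro q hq
          simp at hq
          simp [← hq]

-- ===== VERDICT (by name: the statement is the Claim_ definition above) =====
theorem parse_cmc_int_spec : Claim_equal_parse_cmc_int := by
  intro cost_str _
  unfold Spec_parse_cmc_int
  cases cost_str with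
  | none => rfl
  | some s =>
    have h := pvSim s.toList 0 [] [] (by simp [pvInv, pvVal])
    simpa [parse_cmc_int, parse_cmc_int_alt, pvAFin] using h
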